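-- pv_equiv track=rewrite | github.com/kaneliu120/autoloop | scripts/autoloop-controller.py | _findings_md_h2_section_lines
-- ===== SOURCE A (Python) =====
-- def _findings_md_h2_section_lines(lines, keywords):
--     """ ``## ``  keyword , Returns ``## `` ()."""
--     for i, line in enumerate(lines):
--         if line.startswith("## ") and any(k in line for k in keywords):
--             out = []
--             for j in range(i + 1, len(lines)):
--                 ln = lines[j]
--                 if ln.startswith("## "):
--                     break
--                 out.append(ln)
--             return out
--     return []
-- ===== SOURCE B (Python) =====
-- def _findings_md_h2_section_lines(lines, keywords):
--     """Single linear pass with a collecting flag instead of nested index loops."""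
--     out = []
--     collecting = False
--     for line in lines:
--         if line.startswith("## "):
--             if collecting:
--                 break
--             if any(k in line for k in keywords):
--                 collecting = True
--         elif collecting:
--             out.append(line)
--     return out
-- ===== Notes on version B (the rewrite author's own statement) =====
-- stated objective: simpler
-- what changed: Replaces the outer enumerate search plus inner index loop with one linear state-machine pass over the lines using a collecting flag.
import Mathlib
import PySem

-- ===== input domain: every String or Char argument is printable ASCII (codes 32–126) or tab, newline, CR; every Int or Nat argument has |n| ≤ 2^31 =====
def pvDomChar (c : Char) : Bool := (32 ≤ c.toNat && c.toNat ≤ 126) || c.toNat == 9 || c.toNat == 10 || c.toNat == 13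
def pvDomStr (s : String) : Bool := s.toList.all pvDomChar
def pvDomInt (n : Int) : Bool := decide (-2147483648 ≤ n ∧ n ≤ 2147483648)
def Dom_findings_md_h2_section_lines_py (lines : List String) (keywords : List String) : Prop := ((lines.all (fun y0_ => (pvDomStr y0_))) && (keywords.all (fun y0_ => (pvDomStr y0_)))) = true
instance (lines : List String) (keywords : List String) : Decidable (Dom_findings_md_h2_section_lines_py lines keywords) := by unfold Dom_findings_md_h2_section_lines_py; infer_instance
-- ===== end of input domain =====

-- B replaces A's outer-search-then-inner-index-loop with one linear pass carrying a collecting flag (objective: simpler).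

-- ===== PORT A =====
-- inner loop: for j in range(i+1, len(lines)): ln = lines[j]; break on header else append
def pvInnerA (lines : List String) : List Int → List String
  | [] => []
  | j :: js =>
    match PySem.List.pyGet? lines j with
    | none => []   -- unreachable: j drawn from range(i+1, len(lines))
    | some ln =>
      if PySem.Str.startswith ln "## " then []
      else ln :: pvInnerA lines js

-- outer loop: for i, line in enumerate(lines)
def pvOuterA (lines keywords : List String) (i : Nat) : List String → List String
  | [] => []
  | line :: rest =>
    if PySem.Str.startswith line "## " && keywords.any (fun k => PySem.Str.isIn k line) then
      pvInnerA lines (PySem.List.pyRange ((i : Int) + 1) (lines.length : Int) 1)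
    else
      pvOuterA lines keywords (i + 1) rest

def findings_md_h2_section_lines_py (lines : List String) (keywords : List String) : List String :=
  pvOuterA lines keywords 0 lines

-- ===== PORT B =====
def pvLoopB (keywords : List String) (collecting : Bool) (out : List String) : List String → List String
  | [] => out
  | line :: rest =>
    if PySem.Str.startswith line "## " then
      if collecting then out
      else if keywords.any (fun k => PySem.Str.isIn k line) then pvLoopB keywords true out rest
      else pvLoopB keywords collecting out rest
    else if collecting then pvLoopB keywords collecting (out ++ [line]) rest
    else pvLoopB keywords collecting out rest

def findings_md_h2_section_lines_py_alt (lines : List String) (keywords : List String) : List String :=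
  pvLoopB keywords false [] lines

-- ===== PRECONDITION & SPEC =====
def Spec_findings_md_h2_section_lines_py (lines : List String) (keywords : List String) (out : List String) : Prop := out = findings_md_h2_section_lines_py_alt lines keywords
instance (lines : List String) (keywords : List String) (out : List String) : Decidable (Spec_findings_md_h2_section_lines_py lines keywords out) := by unfold Spec_findings_md_h2_section_lines_py; infer_instance

-- ===== CLAIM (what is proved, stated in full; the proofs are below) =====
def Claim_equal_findings_md_h2_section_lines_py : Prop := ∀ (lines : List String) (keywords : List String), Dom_findings_md_h2_section_lines_py lines keywords → Spec_findings_md_h2_section_lines_py lines keywords (findings_md_h2_section_lines_py lines keywords)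

-- ===== LEMMAS AND PROOFS =====

-- B's collecting phase is a takeWhile over the remaining lines.
theorem pvLoopB_true (keywords out : List String) (rest : List String) :
    pvLoopB keywords true out rest = out ++ rest.takeWhile (fun ln => !PySem.Str.startswith ln "## ") := by
  induction rest generalizing out with
  | nil => simp [pvLoopB]
  | cons ln rest ih =>
    by_cases h : PySem.Chars.startswith ln.toList ['#', '#', ' '] = true <;>
      simp [pvLoopB, h, ih, PySem.Str.startswith_eq]

-- A's inner index loop is the same takeWhile over the dropped suffix.
theorem pvInnerA_eq (lines : List String) (i : Nat) :
    pvInnerA lines (PySem.List.pyRange (i : Int) (lines.length : Int) 1) =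
      (lines.drop i).takeWhile (fun ln => !PySem.Str.startswith ln "## ") := by
  by_cases hlt : i < lines.length
  · obtain ⟨ln, hln⟩ : ∃ ln, lines[i]? = some ln := by
      exact ⟨lines[i], List.getElem?_eq_getElem hlt⟩
    have hcons : PySem.List.pyRange (i : Int) (lines.length : Int) 1
        = (i : Int) :: PySem.List.pyRange ((i : Int) + 1) (lines.length : Int) 1 :=
      PySem.List.pyRange_one_cons (by exact_mod_cast hlt)
    have hdrop : lines.drop i = ln :: lines.drop (i + 1) := by
      rw [List.drop_eq_getElem_cons hlt]
      simp [List.getElem?_eq_getElem hlt] at hln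
      simp [hln]
    have hrec : ((i : Int) + 1) = ((i + 1 : Nat) : Int) := by push_cast; ring
    rw [hcons, hdrop]
    simp only [pvInnerA, PySem.List.pyGet?_natCast, hln, List.takeWhile_cons]
    rw [hrec, pvInnerA_eq lines (i + 1)]
    by_cases h : PySem.Chars.startswith ln.toList ['#', '#', ' '] = true <;>
      simp [h, PySem.Str.startswith_eq]
  · have h1 : lines.drop i = [] := List.drop_eq_nil_of_le (by omega)
    have h2 : PySem.List.pyRange (i : Int) (lines.length : Int) 1 = [] :=
      PySem.List.pyRange_one_eq_nil (by exact_mod_cast Nat.le_of_not_lt hlt)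
    simp [h1, h2, pvInnerA]
termination_by lines.length - i

-- main invariant: A's outer loop at index i over the suffix matches B's non-collecting phase.
theorem pvOuter_eq (lines keywords : List String) (i : Nat) (rest : List String)
    (hrest : rest = lines.drop i) :
    pvOuterA lines keywords i rest = pvLoopB keywords false [] rest := by
  induction rest generalizing i with
  | nil => simp [pvOuterA, pvLoopB]
  | cons line rest ih =>
    have hdrop1 : rest = lines.drop (i + 1) := by
      have := congrArg (List.drop 1) hrest
      simpa [List.drop_drop, Nat.add_comm] using this
    by_cases hh : PySem.Str.startswith line "## " = true
    · by_cases hk : keywords.any (fun k => PySem.Str.isIn k line) = true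
      · have hi : ((i : Int) + 1) = ((i + 1 : Nat) : Int) := by push_cast; ring
        simp only [pvOuterA, pvLoopB, hh, hk, Bool.and_self, if_pos]
        rw [hi, pvInnerA_eq, pvLoopB_true, ← hdrop1]
        simp
      · simp only [pvOuterA, pvLoopB, hh, hk, Bool.and_false, if_true]
        exact ih (i + 1) hdrop1
    · simp only [pvOuterA, pvLoopB, hh, Bool.false_and]
      exact ih (i + 1) hdrop1

-- ===== VERDICT (by name: the statement is the Claim_ definition above) =====
theorem findings_md_h2_section_lines_py_spec : Claim_equal_findings_md_h2_section_lines_py := by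
  intro lines keywords _
  unfold Spec_findings_md_h2_section_lines_py findings_md_h2_section_lines_py findings_md_h2_section_lines_py_alt
  exact pvOuter_eq lines keywords 0 lines (by simp)
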